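-- pv_equiv track=rewrite | github.com/SunkyuKim/rectal_mri_survival | preprocessing.py | max_value_in_column
-- ===== SOURCE A (Python) =====
-- def max_value_in_column(dict, column_name):
--     res = []
--     for key in dict.keys():
--         c_value = dict[key][column_name]
--         res.append(c_value)
--     max_res = max(res)
--     min_res = min(res)
--     return max_res, min_res
-- ===== SOURCE B (Python) =====
-- def max_value_in_column(dict, column_name):
--     max_res = min_res = None
--     for row in dict.values():
--         v = row[column_name]
--         if max_res is None:
--             max_res = min_res = v
--         else:
--             if v > max_res:
--                 max_res = v
--             if v < min_res:
--                 min_res = v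
--     return max_res, min_res
-- ===== Notes on version B (the rewrite author's own statement) =====
-- stated objective: simpler
-- what changed: B replaces A's build-a-list-then-scan-it-twice (append all column values, then max() and then min()) by a single pass over dict.values() maintaining two running accumulators; Pre_ excludes the empty dict, on which A raises ValueError from max([]) while B's tuple (None, None) is not a value of the declared type.
import Mathlib
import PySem

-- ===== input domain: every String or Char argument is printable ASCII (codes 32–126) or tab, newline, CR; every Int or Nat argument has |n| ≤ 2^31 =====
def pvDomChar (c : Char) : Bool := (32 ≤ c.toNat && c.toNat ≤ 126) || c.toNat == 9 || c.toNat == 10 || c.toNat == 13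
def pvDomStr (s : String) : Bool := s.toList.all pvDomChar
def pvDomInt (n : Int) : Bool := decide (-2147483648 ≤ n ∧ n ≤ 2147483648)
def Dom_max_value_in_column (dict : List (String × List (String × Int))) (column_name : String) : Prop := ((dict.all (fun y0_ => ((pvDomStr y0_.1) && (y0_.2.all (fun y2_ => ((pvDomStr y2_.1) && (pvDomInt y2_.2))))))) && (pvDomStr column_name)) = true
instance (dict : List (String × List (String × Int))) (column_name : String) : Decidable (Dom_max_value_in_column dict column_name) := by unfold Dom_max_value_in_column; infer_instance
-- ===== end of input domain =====

-- B: single pass over dict.values() with two running accumulators instead of A's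
-- collect-into-a-list-then-max()-then-min() (objective: simpler); the empty dict is excluded by Pre_.


-- ===== PORT A =====
-- res = []; for key in dict.keys(): res.append(dict[key][column_name])
def aRes (dict : List (String × List (String × Int))) (column_name : String) : List Int :=
  (PySem.Dict.ofList dict).keys.foldl (fun res key =>
    match ((PySem.Dict.ofList dict).get? key).bind (fun row => (PySem.Dict.ofList row).get? column_name) with
    | some v => res ++ [v]
    | none => res) []   -- dict[key] is always found for key ∈ keys; a missing column_name is a KeyError (excluded by Pre_)

-- return max(res), min(res);  max([])/min([]) is a ValueError: Pre_ excludes the empty dict, so .getD 0 is never taken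
def max_value_in_column (dict : List (String × List (String × Int))) (column_name : String) : Int × Int :=
  ((PySem.List.max? (aRes dict column_name) (fun y => y)).getD 0,
   (PySem.List.min? (aRes dict column_name) (fun y => y)).getD 0)

-- ===== PORT B =====
-- single pass over dict.values(); state none = "no value seen yet" (max_res is None)
def bState (dict : List (String × List (String × Int))) (column_name : String) : Option (Int × Int) :=
  (PySem.Dict.ofList dict).values.foldl (fun acc row =>
    match (PySem.Dict.ofList row).get? column_name with
    | none => acc   -- KeyError in Python; excluded by Pre_
    | some v =>
      match acc with
      | none => some (v, v)
      | some (mx, mn) => some ((if v > mx then v else mx), (if v < mn then v else mn))) none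

def max_value_in_column_alt (dict : List (String × List (String × Int))) (column_name : String) : Int × Int :=
  match bState dict column_name with
  | none => (0, 0)   -- Python B returns (None, None) here (empty dict), not an int pair; excluded by Pre_
  | some p => p

-- ===== PRECONDITION & SPEC =====
-- Pre_ excludes the empty dict (A raises ValueError from max([]); B's (None, None) is not a value of the
-- declared type) and inputs where some row lacks column_name (both raise KeyError).
def Pre_max_value_in_column (dict : List (String × List (String × Int))) (column_name : String) : Prop :=
  (PySem.Dict.ofList dict).items ≠ [] ∧
  ∀ p ∈ (PySem.Dict.ofList dict).items, ((PySem.Dict.ofList p.2).get? column_name).isSome = true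
instance (dict : List (String × List (String × Int))) (column_name : String) : Decidable (Pre_max_value_in_column dict column_name) := by unfold Pre_max_value_in_column; infer_instance

def pvWitness_max_value_in_column : (List (String × List (String × Int))) × String :=
  ([("a", [("c", 3), ("d", 1)]), ("b", [("c", -2)])], "c")

def Spec_max_value_in_column (dict : List (String × List (String × Int))) (column_name : String) (out : Int × Int) : Prop := out = max_value_in_column_alt dict column_name
instance (dict : List (String × List (String × Int))) (column_name : String) (out : Int × Int) : Decidable (Spec_max_value_in_column dict column_name out) := by unfold Spec_max_value_in_column; infer_instance

-- ===== CLAIM (what is proved, stated in full; the proofs are below) =====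
def Claim_equal_max_value_in_column : Prop := ∀ (dict : List (String × List (String × Int))) (column_name : String), Dom_max_value_in_column dict column_name → Pre_max_value_in_column dict column_name → Spec_max_value_in_column dict column_name (max_value_in_column dict column_name)

-- ===== LEMMAS AND PROOFS =====

-- A's append loop collects exactly the filterMap of the lookups
theorem afold_eq_filterMap {α : Type} (g : α → Option Int) :
    ∀ (rows : List α) (res0 : List Int),
      rows.foldl (fun res row => match g row with | some v => res ++ [v] | none => res) res0
        = res0 ++ rows.filterMap g := by
  intro rows
  induction rows with
  | nil => intro res0; simp
  | cons r t ih =>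
    intro res0
    cases h : g r with
    | none => simp [List.foldl, h, ih]
    | some v => simp [List.foldl, h, ih]

-- B's accumulator loop, once seeded, computes the running max/min of the collected values
theorem bfold_some {α : Type} (g : α → Option Int) :
    ∀ (rows : List α) (mx mn : Int),
      rows.foldl (fun acc row =>
        match g row with
        | none => acc
        | some v =>
          match acc with
          | none => some (v, v)
          | some (mx, mn) => some ((if v > mx then v else mx), (if v < mn then v else mn)))
        (some (mx, mn))
        = some ((rows.filterMap g).foldl max mx, (rows.filterMap g).foldl min mn) := by
  intro rows
  induction rows with
  | nil => intro mx mn; simp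
  | cons r t ih =>
    intro mx mn
    cases h : g r with
    | none => simp [List.foldl, h, ih]
    | some v =>
      have hmax : (if v > mx then v else mx) = max mx v := by
        split <;> omega
      have hmin : (if v < mn then v else mn) = min mn v := by
        split <;> omega
      simp [List.foldl, h, ih, hmax, hmin]

-- ===== VERDICT (by name: the statement is the Claim_ definition above) =====
theorem max_value_in_column_spec : Claim_equal_max_value_in_column := by
  intro dict column_name _ hpre
  obtain ⟨hne, hsome⟩ := hpre
  unfold Spec_max_value_in_column max_value_in_column max_value_in_column_alt bState aRes
  set d := PySem.Dict.ofList dict with hd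
  have hnd : d.keys.Nodup := PySem.Dict.nodup_keys_ofList dict
  have hkeys : d.keys = d.items.map (·.1) := rfl
  have hvals : d.values = d.items.map (·.2) := rfl
  rw [hkeys, hvals, List.foldl_map, List.foldl_map]
  -- replace d.get? p.1 with some p.2 for items p (keys are unique)
  have hrepl :
      d.items.foldl (fun res p =>
        match (d.get? p.1).bind (fun row => (PySem.Dict.ofList row).get? column_name) with
        | some v => res ++ [v]
        | none => res) []
      = d.items.foldl (fun res p =>
        match (PySem.Dict.ofList p.2).get? column_name with
        | some v => res ++ [v]
        | none => res) [] := by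
    apply PySem.List.foldl_congr_mem
    intro res p hp
    obtain ⟨k, row⟩ := p
    have : d.get? k = some row := PySem.Dict.get?_of_mem_items d hp hnd
    rw [this]
    rfl
  rw [hrepl, afold_eq_filterMap]
  -- items is nonempty; its head's lookup is some
  cases hitems : d.items with
  | nil => exact absurd hitems hne
  | cons p t =>
    have hp : ((PySem.Dict.ofList p.2).get? column_name).isSome = true := by
      apply hsome; rw [hitems]; exact List.mem_cons_self
    obtain ⟨v, hv⟩ := Option.isSome_iff_exists.mp hp
    simp only [List.filterMap_cons, List.foldl_cons, hv, List.nil_append]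
    rw [bfold_some]
    rw [PySem.List.max?_id_cons, PySem.List.min?_id_cons]
    rfl
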